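-- pv_equiv track=rewrite | github.com/inference-labs-inc/JSTprove | python/scripts/gen_and_bench.py | _max_pools_allowed
-- ===== SOURCE A (Python) =====
-- def _max_pools_allowed(input_hw: int, stop_at_hw: int) -> int:
--     """
--     Given input spatial size H=W=input_hw, how many 2x2 stride-2 pools
--     can we apply before H would drop below stop_at_hw?
--     """
--     if input_hw <= 0 or stop_at_hw <= 0:
--         return 0
--     pools = 0
--     h = input_hw
--     while h >= 2 and (h // 2) >= stop_at_hw:
--         pools += 1
--         h //= 2
--     return pools
-- ===== SOURCE B (Python) =====
-- def _max_pools_allowed(input_hw: int, stop_at_hw: int) -> int: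
--     if input_hw <= 0 or stop_at_hw <= 0:
--         return 0
--     m = input_hw // stop_at_hw
--     if m < 1:
--         return 0
--     return m.bit_length() - 1
-- ===== Notes on version B (the rewrite author's own statement) =====
-- stated objective: faster
-- what changed: Replaces the repeated-halving while loop with a closed form: the answer is (input_hw // stop_at_hw).bit_length() - 1 when the quotient is at least 1, else 0.
import Mathlib
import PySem

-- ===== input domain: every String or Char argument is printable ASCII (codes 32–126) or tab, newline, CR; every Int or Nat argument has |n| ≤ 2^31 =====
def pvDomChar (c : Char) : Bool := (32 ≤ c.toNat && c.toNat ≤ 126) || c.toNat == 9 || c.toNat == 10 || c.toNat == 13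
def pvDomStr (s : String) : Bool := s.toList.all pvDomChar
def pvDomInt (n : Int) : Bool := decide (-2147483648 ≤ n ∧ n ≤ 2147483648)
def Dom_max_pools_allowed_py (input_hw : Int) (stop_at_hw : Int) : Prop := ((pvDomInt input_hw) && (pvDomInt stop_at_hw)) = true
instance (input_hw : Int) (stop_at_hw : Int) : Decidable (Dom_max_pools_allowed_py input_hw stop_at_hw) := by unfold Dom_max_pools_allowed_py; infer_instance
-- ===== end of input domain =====

-- B replaces A's halving loop by a closed-form bit-length of input_hw // stop_at_hw (objective: faster, O(1) arithmetic instead of O(log) loop iterations).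

-- ===== PORT A =====
-- the while loop of A: state (pools, h); recursion on h, which strictly decreases while the guard holds
def pvLoopA (s : Int) (pools : Int) (h : Int) : Int :=
  if 2 ≤ h ∧ s ≤ PySem.Int.floordiv h 2 then
    pvLoopA s (pools + 1) (PySem.Int.floordiv h 2)
  else pools
termination_by h.toNat
decreasing_by
  rename_i hc
  rw [PySem.Int.floordiv_eq_ediv_of_pos (by omega : (0:Int) < 2)] at *
  omega

def max_pools_allowed_py (input_hw : Int) (stop_at_hw : Int) : Int :=
  if input_hw ≤ 0 ∨ stop_at_hw ≤ 0 then 0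
  else pvLoopA stop_at_hw 0 input_hw

-- ===== PORT B =====
def max_pools_allowed_py_alt (input_hw : Int) (stop_at_hw : Int) : Int :=
  if input_hw ≤ 0 ∨ stop_at_hw ≤ 0 then 0
  else
    let m := PySem.Int.floordiv input_hw stop_at_hw
    if m < 1 then 0 else (PySem.Int.bitLength m : Int) - 1

-- ===== PRECONDITION & SPEC =====
def Spec_max_pools_allowed_py (input_hw : Int) (stop_at_hw : Int) (out : Int) : Prop := out = max_pools_allowed_py_alt input_hw stop_at_hw
instance (input_hw : Int) (stop_at_hw : Int) (out : Int) : Decidable (Spec_max_pools_allowed_py input_hw stop_at_hw out) := by unfold Spec_max_pools_allowed_py; infer_instance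

-- ===== CLAIM (what is proved, stated in full; the proofs are below) =====
def Claim_equal_max_pools_allowed_py : Prop := ∀ (input_hw : Int) (stop_at_hw : Int), Dom_max_pools_allowed_py input_hw stop_at_hw → Spec_max_pools_allowed_py input_hw stop_at_hw (max_pools_allowed_py input_hw stop_at_hw)

-- ===== LEMMAS AND PROOFS =====

-- the closed form B computes for positive inputs
def pvClosed (h s : Int) : Int :=
  if h / s < 1 then 0 else (PySem.Int.bitLength (h / s) : Int) - 1

lemma pvLoopA_eq (n : Nat) : ∀ (h s p : Int), h.toNat ≤ n → 1 ≤ h → 1 ≤ s →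
    pvLoopA s p h = p + pvClosed h s := by
  induction n with
  | zero => intro h s p hn h1 _; omega
  | succ n ih =>
    intro h s p hn h1 hs
    rw [pvLoopA]
    rw [PySem.Int.floordiv_eq_ediv_of_pos (by omega : (0:Int) < 2)]
    split_ifs with hc
    · obtain ⟨h2, hdiv⟩ := hc
      have h2s : 2 * s ≤ h := by
        have := (Int.le_ediv_iff_mul_le (by omega : (0:Int) < 2)).mp hdiv; omega
      have hrec : pvLoopA s (p + 1) (h / 2) = (p + 1) + pvClosed (h / 2) s := by
        apply ih <;> omega
      rw [hrec]
      -- pvClosed h s = pvClosed (h/2) s + 1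
      have hsw : h / 2 / s = h / s / 2 := by
        rw [Int.ediv_ediv_of_nonneg (by omega : (0:Int) ≤ 2),
            Int.ediv_ediv_of_nonneg (by omega : (0:Int) ≤ s), Int.mul_comm]
      have hq2 : 2 ≤ h / s := (Int.le_ediv_iff_mul_le (by omega : (0:Int) < s)).mpr (by omega)
      have hq1 : 1 ≤ h / 2 / s := (Int.le_ediv_iff_mul_le (by omega : (0:Int) < s)).mpr (by omega)
      have hbl : PySem.Int.bitLength (h / s) = PySem.Int.bitLength (h / s / 2) + 1 := by
        have := PySem.Int.bitLength_of_pos (n := h / s) (by omega)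
        rwa [PySem.Int.floordiv_eq_ediv_of_pos (by omega : (0:Int) < 2)] at this
      have hbl1 : 1 ≤ PySem.Int.bitLength (h / s / 2) := by
        have h1' : (1:Int) ≤ h / s / 2 := by rw [← hsw]; exact hq1
        by_contra hlt
        have h0 : PySem.Int.bitLength (h / s / 2) = 0 := by omega
        have := PySem.Int.lt_two_pow_bitLength (h / s / 2)
        rw [h0] at this; simp at this; omega
      simp only [pvClosed, hsw]
      rw [if_neg (by omega), if_neg (by rw [← hsw] at *; omega)]
      push_cast [hbl]
      ring
    · -- guard fails: closed form is 0
      have hq : h / s ≤ 1 := by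
        rcases not_and_or.mp hc with hlt | hlt
        · have : h = 1 := by omega
          subst this
          exact Int.ediv_le_self s (by omega)
        · have : h < 2 * s := by
            have := (Int.ediv_lt_iff_lt_mul (by omega : (0:Int) < 2)).mp (by omega : h / 2 < s)
            omega
          have : h / s < 2 := by
            by_contra hge
            have := (Int.le_ediv_iff_mul_le (by omega : (0:Int) < s)).mp (by omega : 2 ≤ h / s)
            omega
          omega
      simp only [pvClosed]
      rcases lt_or_ge (h / s) 1 with hlt | hge
      · rw [if_pos hlt]; ring
      · have hq1 : h / s = 1 := by omega
        rw [if_neg (by omega), hq1]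
        norm_num [show PySem.Int.bitLength 1 = 1 from by decide]

-- ===== VERDICT (by name: the statement is the Claim_ definition above) =====
theorem max_pools_allowed_py_spec : Claim_equal_max_pools_allowed_py := by
  intro input_hw stop_at_hw _
  unfold Spec_max_pools_allowed_py max_pools_allowed_py max_pools_allowed_py_alt
  split_ifs with hneg
  · rfl
  · push Not at hneg
    have h1 : 1 ≤ input_hw := by omega
    have hs : 1 ≤ stop_at_hw := by omega
    rw [pvLoopA_eq input_hw.toNat input_hw stop_at_hw 0 (by omega) h1 hs]
    simp only [pvClosed, PySem.Int.floordiv_eq_ediv_of_pos (by omega : (0:Int) < stop_at_hw),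
      zero_add]
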